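-- pv_equiv track=rewrite | github.com/SWeszler/google-kickstart | 2020_F/F1/f1.py | solution_bf
-- ===== SOURCE A (Python) =====
-- def solution_bf(N, X, queue):
--     res = []
--
--     i = 0
--     while len(res) < N:
--         if queue[i] > 0:
--             queue[i] -= X
--             if queue[i] <= 0:
--                 res.append(str(i + 1))
--                 queue[i] = 0
--         i += 1
--         if i >= N:
--             i = 0
--
--     return " ".join(res)
-- ===== SOURCE B (Python) =====
-- def solution_bf(N, X, queue):
--     # Closed-form: element i is eliminated in round ceil(queue[i]/X); order by (round, index).
--     rounds = [-(-queue[i] // X) for i in range(N)]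
--     order = sorted(range(N), key=lambda i: (rounds[i], i))
--     return " ".join(str(i + 1) for i in order)
-- ===== Notes on version B (the rewrite author's own statement) =====
-- stated objective: alternative
-- what changed: A simulates the elimination process round by round, decrementing every element by X until it reaches 0; B computes each element's elimination round ceil(queue[i]/X) in closed form and sorts the indices by (round, index), removing the simulation loop entirely.
import Mathlib
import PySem

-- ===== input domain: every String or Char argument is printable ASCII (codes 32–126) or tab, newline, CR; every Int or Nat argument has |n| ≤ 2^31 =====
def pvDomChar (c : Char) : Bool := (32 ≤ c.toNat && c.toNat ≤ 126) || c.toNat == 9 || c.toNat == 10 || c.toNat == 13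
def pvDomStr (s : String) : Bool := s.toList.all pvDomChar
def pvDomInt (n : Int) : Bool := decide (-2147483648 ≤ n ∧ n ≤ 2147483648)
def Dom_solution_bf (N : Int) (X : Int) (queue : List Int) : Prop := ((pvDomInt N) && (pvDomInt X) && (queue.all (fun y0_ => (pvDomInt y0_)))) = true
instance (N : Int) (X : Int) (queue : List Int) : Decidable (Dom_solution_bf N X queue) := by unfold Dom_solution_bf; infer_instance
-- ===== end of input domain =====

-- B replaces A's round-by-round simulation by a different algorithm: it computes each element's
-- elimination round ceil(queue[i]/X) in closed form and sorts the indices by (round, index).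
-- A mutates its `queue` argument in place; B does not: the equivalence proved here is about the return value only.


-- ===== PORT A =====
def pvJoin (res : List String) : String := PySem.Str.join " " res

def pvNext (N i : Int) : Int := if i + 1 ≥ N then 0 else i + 1

def pvSum (xs : List Int) : Nat := xs.foldl (fun a q => a + q.toNat) 0

-- fuel: an upper bound on the number of iterations of A's while loop whenever it terminates
-- (≤ N * max round ≤ N * (sum of positive entries + 1)); the loop itself is a literal transliteration.
def pvFuel (N : Int) (queue : List Int) : Nat := N.toNat * (pvSum queue + 1) + 1

def pvLoopA (N X : Int) : Nat → List Int → List String → Int → String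
  | 0, _, res, _ => pvJoin res
  | f+1, qc, res, i =>
    if (res.length : Int) < N then
      match PySem.List.pyGet? qc i with
      | none => pvJoin res   -- Python raises IndexError here; excluded by Pre_solution_bf
      | some qi =>
        if 0 < qi then
          -- queue[i] -= X; if queue[i] <= 0: res.append(str(i+1)); queue[i] = 0
          if qi - X ≤ 0 then
            pvLoopA N X f (PySem.List.pySetD (PySem.List.pySetD qc i (qi - X)) i 0)
              (res ++ [PySem.Int.toStr (i + 1)]) (pvNext N i)
          else
            pvLoopA N X f (PySem.List.pySetD qc i (qi - X)) res (pvNext N i)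
        else
          pvLoopA N X f qc res (pvNext N i)
    else pvJoin res

def solution_bf (N : Int) (X : Int) (queue : List Int) : String :=
  pvLoopA N X (pvFuel N queue) queue [] 0

-- ===== PORT B =====
def solution_bf_alt (N : Int) (X : Int) (queue : List Int) : String :=
  let idxs := PySem.List.pyRange 0 N 1
  -- rounds = [-(-queue[i] // X) for i in range(N)]  (queue[i] total via pyGetD: in range under Pre_)
  let rounds := idxs.map (fun i => -(PySem.Int.floordiv (-(PySem.List.pyGetD queue i 0)) X))
  -- order = sorted(range(N), key=lambda i: (rounds[i], i))
  let order := PySem.List.sorted2 idxs (fun i => PySem.List.pyGetD rounds i 0) (fun i => i)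
  PySem.Str.join " " (order.map (fun i => PySem.Int.toStr (i + 1)))

-- ===== PRECONDITION & SPEC =====
-- Pre_ excludes exactly the inputs where A does not return: N > len(queue) with all visited
-- entries positive raises IndexError, and X ≤ 0 or a non-positive entry among the first N
-- makes A's while loop run forever (an element never reaches 0, res never fills up).
def Pre_solution_bf (N : Int) (X : Int) (queue : List Int) : Prop :=
  N ≤ 0 ∨ (0 < X ∧ N ≤ (queue.length : Int) ∧
    ∀ j ∈ PySem.List.pyRange 0 N 1, 0 < PySem.List.pyGetD queue j 0)
instance (N : Int) (X : Int) (queue : List Int) : Decidable (Pre_solution_bf N X queue) := by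
  unfold Pre_solution_bf; infer_instance

def pvWitness_solution_bf : Int × Int × List Int := (3, 2, [3, 1, 5])

def Spec_solution_bf (N : Int) (X : Int) (queue : List Int) (out : String) : Prop := out = solution_bf_alt N X queue
instance (N : Int) (X : Int) (queue : List Int) (out : String) : Decidable (Spec_solution_bf N X queue out) := by unfold Spec_solution_bf; infer_instance

-- ===== CLAIM (what is proved, stated in full; the proofs are below) =====
def Claim_equal_solution_bf : Prop := ∀ (N : Int) (X : Int) (queue : List Int), Dom_solution_bf N X queue → Pre_solution_bf N X queue → Spec_solution_bf N X queue (solution_bf N X queue)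

-- ===== LEMMAS AND PROOFS =====

-- ceiling key: element j of qs is eliminated in round pvKey X qs j = ceil(qs[j]/X)
def pvKey (X : Int) (qs : List Int) (j : Int) : Int :=
  -(PySem.Int.floordiv (-(PySem.List.pyGetD qs j 0)) X)

-- finish time: element j is appended at iteration pvF N X qs j of A's loop
def pvF (N X : Int) (qs : List Int) (j : Int) : Int := (pvKey X qs j - 1) * N + j

-- number of visits index j has received after t iterations of A's loop
def pvV (N : Int) (t : Nat) (j : Int) : Int :=
  (t : Int) / N + (if j < (t : Int) % N then 1 else 0)

lemma pvKey_bracket {X q : Int} (hX : 0 < X) (hq : 0 < q) :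
    1 ≤ -(PySem.Int.floordiv (-q) X) ∧
    (-(PySem.Int.floordiv (-q) X) - 1) * X < q ∧ q ≤ -(PySem.Int.floordiv (-q) X) * X := by
  set r := -(PySem.Int.floordiv (-q) X) with hr
  have hbr : (r - 1) * X < q ∧ q ≤ r * X :=
    (PySem.Int.neg_floordiv_neg_eq_iff_of_pos hX).mp rfl
  refine ⟨?_, hbr⟩
  by_contra h
  have hr0 : r ≤ 0 := by omega
  have : r * X ≤ 0 := mul_nonpos_iff.mpr (Or.inr ⟨hr0, le_of_lt hX⟩)
  omega

lemma pvUnique {N a b j i : Int} (hN : 0 < N) (hj0 : 0 ≤ j) (hjN : j < N)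
    (hi0 : 0 ≤ i) (hiN : i < N) (h : N * a + j = N * b + i) : a = b ∧ j = i := by
  rcases lt_trichotomy a b with hab | hab | hab
  · have h1 : a - b ≤ -1 := by omega
    have h2 : N * (a - b) ≤ N * (-1) := mul_le_mul_of_nonneg_left h1 (le_of_lt hN)
    have h3 : N * (a - b) = i - j := by ring_nf; linarith [h]
    nlinarith
  · constructor; · exact hab
    subst hab; omega
  · have h1 : b - a ≤ -1 := by omega
    have h2 : N * (b - a) ≤ N * (-1) := mul_le_mul_of_nonneg_left h1 (le_of_lt hN)
    have h3 : N * (b - a) = j - i := by ring_nf; linarith [h]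
    nlinarith

lemma pvDivMod_succ {N : Int} (hN : 0 < N) (T : Int) :
    ((T + 1) / N = T / N + (if T % N + 1 = N then 1 else 0)) ∧
    ((T + 1) % N = (if T % N + 1 = N then 0 else T % N + 1)) := by
  have hsplit := Int.ediv_add_emod T N
  have h0 : 0 ≤ T % N := Int.emod_nonneg _ (by omega)
  have h1 : T % N < N := Int.emod_lt_of_pos _ hN
  by_cases hwrap : T % N + 1 = N
  · have hkey : (T + 1) / N = T / N + 1 ∧ (T + 1) % N = 0 := by
      rw [Int.ediv_emod_unique hN]
      refine ⟨by nlinarith [hsplit], by omega, by omega⟩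
    rw [if_pos hwrap, if_pos hwrap]
    exact hkey
  · have hkey : (T + 1) / N = T / N ∧ (T + 1) % N = T % N + 1 := by
      rw [Int.ediv_emod_unique hN]
      refine ⟨by linarith [hsplit], by omega, by omega⟩
    rw [if_neg hwrap, if_neg hwrap]
    simpa using hkey

lemma pvV_succ {N : Int} (hN : 0 < N) (t : Nat) (j : Int) (hj0 : 0 ≤ j) (hjN : j < N) :
    pvV N (t+1) j = pvV N t j + (if j = (t : Int) % N then 1 else 0) := by
  obtain ⟨hd, hm⟩ := pvDivMod_succ (N := N) hN (t : Int)
  have h1 : (t : Int) % N < N := Int.emod_lt_of_pos _ hN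
  have h0 : 0 ≤ (t : Int) % N := Int.emod_nonneg _ (by omega)
  unfold pvV
  have hc : ((t + 1 : Nat) : Int) = (t : Int) + 1 := by push_cast; ring
  rw [hc, hd, hm]
  by_cases hwrap : (t : Int) % N + 1 = N
  · rw [if_pos hwrap, if_pos hwrap]
    split_ifs <;> omega
  · rw [if_neg hwrap, if_neg hwrap]
    split_ifs <;> omega

lemma pvNext_mod {N : Int} (hN : 0 < N) (t : Nat) :
    pvNext N ((t : Int) % N) = ((t+1 : Nat) : Int) % N := by
  obtain ⟨_, hm⟩ := pvDivMod_succ (N := N) hN (t : Int)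
  have h1 : (t : Int) % N < N := Int.emod_lt_of_pos _ hN
  have h0 : 0 ≤ (t : Int) % N := Int.emod_nonneg _ (by omega)
  have hc : ((t + 1 : Nat) : Int) = (t : Int) + 1 := by push_cast; ring
  unfold pvNext
  rw [hc, hm]
  split_ifs <;> omega

lemma pvSum_shift (xs : List Int) : ∀ a : Nat,
    xs.foldl (fun a q => a + q.toNat) a = a + xs.foldl (fun a q => a + q.toNat) 0 := by
  induction xs with
  | nil => intro a; simp
  | cons x xs ih => intro a; rw [List.foldl_cons, List.foldl_cons, ih (a + x.toNat), ih (0 + x.toNat)]; omega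

lemma pvSum_cons (x : Int) (xs : List Int) : pvSum (x :: xs) = x.toNat + pvSum xs := by
  unfold pvSum
  rw [List.foldl_cons]
  have h := pvSum_shift xs (0 + x.toNat)
  omega

lemma pvSum_getD (xs : List Int) (j : Nat) (hj : j < xs.length) :
    xs.getD j 0 ≤ (pvSum xs : Int) := by
  induction xs generalizing j with
  | nil => simp at hj
  | cons x xs ih =>
    rw [pvSum_cons]
    cases j with
    | zero => simp only [List.getD_cons_zero]; push_cast; omega
    | succ j =>
      have := ih j (by simpa using hj)
      simp only [List.getD_cons_succ]
      push_cast
      omega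

-- filter split along the strictly increasing finish order
lemma pvFilter_split (g : Int → Int) (t : Int) (l : List Int)
    (h : l.Pairwise (fun a b => g a < g b)) :
    l.filter (fun j => decide (g j < t + 1)) =
      l.filter (fun j => decide (g j < t)) ++ l.filter (fun j => decide (g j = t)) := by
  induction l with
  | nil => simp
  | cons a l ih =>
    have hrest := ih h.of_cons
    have hgt : ∀ b ∈ l, g a < g b := fun b hb => (List.pairwise_cons.mp h).1 b hb
    rcases lt_trichotomy (g a) t with hc | hc | hc
    · simp only [List.filter_cons, decide_eq_true_eq]
      rw [if_pos (by omega), if_pos (by omega), if_neg (by omega), hrest, List.cons_append]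
    · have h2 : l.filter (fun j => decide (g j < t + 1)) = [] := by
        rw [List.filter_eq_nil_iff]; intro b hb
        have := hgt b hb; simp only [decide_eq_true_eq]; omega
      have h3 : l.filter (fun j => decide (g j < t)) = [] := by
        rw [List.filter_eq_nil_iff]; intro b hb
        have := hgt b hb; simp only [decide_eq_true_eq]; omega
      have h4 : l.filter (fun j => decide (g j = t)) = [] := by
        rw [List.filter_eq_nil_iff]; intro b hb
        have := hgt b hb; simp only [decide_eq_true_eq]; omega
      simp only [List.filter_cons, decide_eq_true_eq]
      rw [if_pos (by omega), if_neg (by omega), if_pos (by omega), h2, h3, h4]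
      rfl
    · simp only [List.filter_cons, decide_eq_true_eq]
      rw [if_neg (by omega), if_neg (by omega), if_neg (by omega), hrest]

lemma pvLoopA_inv (N X : Int) (qs : List Int) (ord : List Int)
    (hN : 0 < N) (hX : 0 < X) (hlen : N ≤ (qs.length : Int))
    (hpos : ∀ j : Nat, (j : Int) < N → 0 < qs.getD j 0)
    (hperm : ord.Perm (PySem.List.pyRange 0 N 1))
    (hpair : ord.Pairwise (fun a b => pvF N X qs a < pvF N X qs b)) :
    ∀ (f t : Nat) (qc : List Int),
      qc.length = qs.length →
      (∀ j : Nat, qc.getD j 0 =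
        if (j : Int) < N then max (qs.getD j 0 - pvV N t (j : Int) * X) 0 else qs.getD j 0) →
      (∀ j ∈ ord, pvF N X qs j < (t : Int) + (f : Int)) →
      pvLoopA N X f qc
        ((ord.filter (fun j => decide (pvF N X qs j < (t : Int)))).map
          (fun j => PySem.Int.toStr (j + 1))) ((t : Int) % N)
        = pvJoin (ord.map (fun j => PySem.Int.toStr (j + 1))) := by
  have hordlen : ord.length = N.toNat := by
    rw [hperm.length_eq, PySem.List.length_pyRange_one]; omega
  have hmemord : ∀ j ∈ ord, 0 ≤ j ∧ j < N := by
    intro j hj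
    exact PySem.List.mem_pyRange_one.mp (hperm.mem_iff.mp hj)
  intro f
  induction f with
  | zero =>
    intro t qc _ _ hfuel
    have hfilter : ord.filter (fun j => decide (pvF N X qs j < (t : Int))) = ord := by
      rw [List.filter_eq_self]
      intro a ha
      have := hfuel a ha
      simp only [decide_eq_true_eq]
      omega
    rw [hfilter]
    rfl
  | succ f ih =>
    intro t qc hlenq hq hfuel
    have hi0 : 0 ≤ (t : Int) % N := Int.emod_nonneg _ (by omega)
    have hiN : (t : Int) % N < N := Int.emod_lt_of_pos _ hN
    by_cases hdone : ∀ j ∈ ord, pvF N X qs j < (t : Int)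
    · have hfilter : ord.filter (fun j => decide (pvF N X qs j < (t : Int))) = ord := by
        rw [List.filter_eq_self]; intro a ha; simpa using hdone a ha
      rw [hfilter]
      simp only [pvLoopA]
      rw [if_neg (by rw [List.length_map, hordlen]; omega)]
    · push_neg at hdone
      obtain ⟨j₀, hj₀mem, hj₀⟩ := hdone
      have hreslt : (((ord.filter (fun j => decide (pvF N X qs j < (t : Int)))).map
          (fun j => PySem.Int.toStr (j + 1))).length : Int) < N := by
        rw [List.length_map]
        have hlt : (ord.filter (fun j => decide (pvF N X qs j < (t : Int)))).length < ord.length :=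
          List.length_filter_lt_length_iff_exists.mpr
            ⟨j₀, hj₀mem, by simp only [decide_eq_true_eq]; omega⟩
        rw [hordlen] at hlt
        omega
      simp only [pvLoopA]
      rw [if_pos hreslt]
      have hit : ((((t : Int) % N).toNat : Nat) : Int) = (t : Int) % N := Int.toNat_of_nonneg hi0
      have hmlen : ((t : Int) % N).toNat < qc.length := by rw [hlenq]; omega
      have hget : PySem.List.pyGet? qc ((t : Int) % N) =
          some (qc.getD (((t : Int) % N).toNat) 0) := by
        conv_lhs => rw [← hit]
        rw [PySem.List.pyGet?_natCast, List.getElem?_eq_getElem hmlen]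
        rw [List.getD_eq_getElem?_getD, List.getElem?_eq_getElem hmlen]
        rfl
      simp only [hget]
      set m : Nat := ((t : Int) % N).toNat with hm
      have hqi := hq m
      rw [if_pos (by omega)] at hqi
      have hqpos : 0 < qs.getD m 0 := hpos m (by omega)
      have hkey : pvKey X qs ((t : Int) % N) = -(PySem.Int.floordiv (-(qs.getD m 0)) X) := by
        unfold pvKey
        rw [PySem.List.pyGetD_of_nonneg _ _ hi0]
      obtain ⟨hr1, hbr1, hbr2⟩ := pvKey_bracket (q := qs.getD m 0) hX hqpos
      rw [← hkey] at hr1 hbr1 hbr2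
      have hv : pvV N t ((t : Int) % N) = (t : Int) / N := by
        unfold pvV; rw [if_neg (lt_irrefl _)]; ring
      have hk0 : 0 ≤ (t : Int) / N := Int.ediv_nonneg (by omega) (by omega)
      have hsplitT : N * ((t : Int) / N) + (t : Int) % N = (t : Int) := Int.ediv_add_emod _ _
      have hvq : qc.getD m 0 = max (qs.getD m 0 - ((t : Int) / N) * X) 0 := by
        rw [hqi, hit, hv]
      have hfIeq : ∀ j ∈ ord, pvF N X qs j = (t : Int) ↔
          (j = (t : Int) % N ∧ pvKey X qs j - 1 = (t : Int) / N) := by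
        intro j hj
        obtain ⟨hj0, hjN⟩ := hmemord j hj
        constructor
        · intro he
          have hmc : (pvKey X qs j - 1) * N = N * (pvKey X qs j - 1) := by ring
          have h' : N * (pvKey X qs j - 1) + j = N * ((t : Int) / N) + (t : Int) % N := by
            unfold pvF at he
            linarith [he, hsplitT, hmc]
          have := pvUnique hN hj0 hjN hi0 hiN h'
          exact ⟨this.2, this.1⟩
        · rintro ⟨h1, h2⟩
          unfold pvF
          rw [h1] at h2 ⊢
          rw [h2]
          linarith [hsplitT, mul_comm ((t : Int) / N) N]
      have hfuel' : ∀ j ∈ ord, pvF N X qs j < ((t + 1 : Nat) : Int) + (f : Int) := by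
        intro j hj; have := hfuel j hj; push_cast at this ⊢; omega
      have hcast : ((t + 1 : Nat) : Int) = (t : Int) + 1 := by push_cast; ring
      have hsplitF := pvFilter_split (fun j => pvF N X qs j) (t : Int) ord hpair
      by_cases halive : (t : Int) / N < pvKey X qs ((t : Int) % N)
      · -- the current element is still positive
        have hmul1 : ((t : Int) / N) * X ≤ (pvKey X qs ((t : Int) % N) - 1) * X :=
          mul_le_mul_of_nonneg_right (by omega) (le_of_lt hX)
        have hqval : qc.getD m 0 = qs.getD m 0 - ((t : Int) / N) * X := by
          rw [hvq, max_eq_left (by linarith)]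
        have hqcpos : 0 < qc.getD m 0 := by rw [hqval]; linarith
        rw [if_pos hqcpos]
        by_cases hfin : qc.getD m 0 - X ≤ 0
        · -- finishes now: its round is exactly (t / N) + 1
          have hXsum : (((t : Int) / N) + 1) * X = ((t : Int) / N) * X + X := by ring
          have h1 : qs.getD m 0 - (((t : Int) / N) + 1) * X ≤ 0 := by
            rw [hqval] at hfin; linarith
          have hrk : pvKey X qs ((t : Int) % N) - 1 = (t : Int) / N := by
            by_contra hne
            have h2 : (t : Int) / N + 1 ≤ pvKey X qs ((t : Int) % N) - 1 := by omega
            have h3 : ((t : Int) / N + 1) * X ≤ (pvKey X qs ((t : Int) % N) - 1) * X :=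
              mul_le_mul_of_nonneg_right h2 (le_of_lt hX)
            linarith
          rw [if_pos hfin]
          have hsets : PySem.List.pySetD
              (PySem.List.pySetD qc ((t : Int) % N) (qc.getD m 0 - X)) ((t : Int) % N) 0 =
              qc.set m 0 := by
            rw [PySem.List.pySetD_of_nonneg _ _ hi0, PySem.List.pySetD_of_nonneg _ _ hi0]
            exact List.set_set _
          rw [hsets, pvNext_mod hN t]
          have hiord : ((t : Int) % N) ∈ ord :=
            hperm.mem_iff.mpr (PySem.List.mem_pyRange_one.mpr ⟨hi0, hiN⟩)
          have hione : ord.filter (fun j => decide (pvF N X qs j = (t : Int))) = [(t : Int) % N] := by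
            have hcongr : ord.filter (fun j => decide (pvF N X qs j = (t : Int))) =
                ord.filter (fun j => j == (t : Int) % N) := by
              apply List.filter_congr
              intro j hj
              have hif : (pvF N X qs j = (t : Int)) ↔ (j = (t : Int) % N) := by
                constructor
                · intro he; exact ((hfIeq j hj).mp he).1
                · intro he; exact (hfIeq j hj).mpr ⟨he, by rw [he]; exact hrk⟩
              rw [Bool.eq_iff_iff]
              simp [hif]
            rw [hcongr, List.filter_beq,
              List.count_eq_one_of_mem (hperm.symm.nodup (PySem.List.nodup_pyRange_one _ _)) hiord]
            rfl
          have hres : (ord.filter (fun j => decide (pvF N X qs j < (t : Int)))).map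
                (fun j => PySem.Int.toStr (j + 1)) ++ [PySem.Int.toStr ((t : Int) % N + 1)]
              = (ord.filter (fun j => decide (pvF N X qs j < ((t + 1 : Nat) : Int)))).map
                (fun j => PySem.Int.toStr (j + 1)) := by
            rw [hcast, hsplitF, hione, List.map_append]
            rfl
          rw [hres]
          apply ih (t+1) (qc.set m 0) (by rw [List.length_set]; exact hlenq) _ hfuel'
          intro j
          by_cases hjN : (j : Int) < N
          · rw [if_pos hjN]
            rw [pvV_succ hN t (j : Int) (by omega) hjN]
            by_cases hji : m = j
            · subst hji
              rw [List.getD_eq_getElem?_getD, List.getElem?_set, if_pos rfl, if_pos hmlen]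
              rw [hit, if_pos rfl, hv]
              have : max (qs.getD m 0 - (((t : Int) / N) + 1) * X) 0 = 0 :=
                max_eq_right (by linarith)
              rw [this]
              rfl
            · rw [List.getD_eq_getElem?_getD, List.getElem?_set, if_neg hji,
                ← List.getD_eq_getElem?_getD]
              have hjne : ¬ ((j : Int) = (t : Int) % N) := by omega
              rw [if_neg hjne, add_zero]
              have := hq j
              rw [if_pos hjN] at this
              exact this
          · rw [if_neg hjN]
            have hji : ¬ (m = j) := by omega
            rw [List.getD_eq_getElem?_getD, List.getElem?_set, if_neg hji,
              ← List.getD_eq_getElem?_getD]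
            have := hq j
            rw [if_neg hjN] at this
            exact this
        · -- stays positive: round not reached yet
          have hrk : (t : Int) / N + 1 < pvKey X qs ((t : Int) % N) := by
            by_contra hc
            push_neg at hc
            have h3 : pvKey X qs ((t : Int) % N) * X ≤ ((t : Int) / N + 1) * X :=
              mul_le_mul_of_nonneg_right hc (le_of_lt hX)
            have h4 : (((t : Int) / N) + 1) * X = ((t : Int) / N) * X + X := by ring
            rw [hqval] at hfin
            linarith
          rw [if_neg hfin]
          have hsets : PySem.List.pySetD qc ((t : Int) % N) (qc.getD m 0 - X) =
              qc.set m (qc.getD m 0 - X) := PySem.List.pySetD_of_nonneg _ _ hi0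
          rw [hsets, pvNext_mod hN t]
          have hemp : ord.filter (fun j => decide (pvF N X qs j = (t : Int))) = [] := by
            rw [List.filter_eq_nil_iff]
            intro j hj
            simp only [decide_eq_true_eq]
            intro he
            obtain ⟨he1, he2⟩ := (hfIeq j hj).mp he
            rw [he1] at he2
            omega
          have hres : (ord.filter (fun j => decide (pvF N X qs j < (t : Int)))).map
                (fun j => PySem.Int.toStr (j + 1))
              = (ord.filter (fun j => decide (pvF N X qs j < ((t + 1 : Nat) : Int)))).map
                (fun j => PySem.Int.toStr (j + 1)) := by
            rw [hcast, hsplitF, hemp, List.append_nil]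
          rw [hres]
          apply ih (t+1) (qc.set m (qc.getD m 0 - X))
            (by rw [List.length_set]; exact hlenq) _ hfuel'
          intro j
          by_cases hjN : (j : Int) < N
          · rw [if_pos hjN]
            rw [pvV_succ hN t (j : Int) (by omega) hjN]
            by_cases hji : m = j
            · subst hji
              rw [List.getD_eq_getElem?_getD, List.getElem?_set, if_pos rfl, if_pos hmlen]
              rw [hit, if_pos rfl, hv]
              have h4 : (((t : Int) / N) + 1) * X = ((t : Int) / N) * X + X := by ring
              have : max (qs.getD m 0 - (((t : Int) / N) + 1) * X) 0 =
                  qs.getD m 0 - (((t : Int) / N) + 1) * X := by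
                apply max_eq_left
                have hmul2 : (((t : Int) / N) + 1) * X ≤ (pvKey X qs ((t : Int) % N) - 1) * X :=
                  mul_le_mul_of_nonneg_right (by omega) (le_of_lt hX)
                linarith
              rw [this, hqval]
              simp only [Option.getD_some]
              linarith
            · rw [List.getD_eq_getElem?_getD, List.getElem?_set, if_neg hji,
                ← List.getD_eq_getElem?_getD]
              have hjne : ¬ ((j : Int) = (t : Int) % N) := by omega
              rw [if_neg hjne, add_zero]
              have := hq j
              rw [if_pos hjN] at this
              exact this
          · rw [if_neg hjN]
            have hji : ¬ (m = j) := by omega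
            rw [List.getD_eq_getElem?_getD, List.getElem?_set, if_neg hji,
              ← List.getD_eq_getElem?_getD]
            have := hq j
            rw [if_neg hjN] at this
            exact this
      · -- the current element is already eliminated: queue[i] = 0
        have hmul1 : pvKey X qs ((t : Int) % N) * X ≤ ((t : Int) / N) * X :=
          mul_le_mul_of_nonneg_right (by omega) (le_of_lt hX)
        have hqz : qc.getD m 0 = 0 := by
          rw [hvq]; exact max_eq_right (by linarith)
        rw [if_neg (by rw [hqz]; omega)]
        rw [pvNext_mod hN t]
        have hemp : ord.filter (fun j => decide (pvF N X qs j = (t : Int))) = [] := by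
          rw [List.filter_eq_nil_iff]
          intro j hj
          simp only [decide_eq_true_eq]
          intro he
          obtain ⟨he1, he2⟩ := (hfIeq j hj).mp he
          rw [he1] at he2
          omega
        have hres : (ord.filter (fun j => decide (pvF N X qs j < (t : Int)))).map
              (fun j => PySem.Int.toStr (j + 1))
            = (ord.filter (fun j => decide (pvF N X qs j < ((t + 1 : Nat) : Int)))).map
              (fun j => PySem.Int.toStr (j + 1)) := by
          rw [hcast, hsplitF, hemp, List.append_nil]
        rw [hres]
        apply ih (t+1) qc hlenq _ hfuel'
        intro j
        by_cases hjN : (j : Int) < N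
        · rw [if_pos hjN]
          rw [pvV_succ hN t (j : Int) (by omega) hjN]
          by_cases hji : (j : Int) = (t : Int) % N
          · rw [if_pos hji]
            have hjm : j = m := by omega
            subst hjm
            rw [hqz]
            rw [hji, hv]
            have h4 : (((t : Int) / N) + 1) * X = ((t : Int) / N) * X + X := by ring
            symm
            apply max_eq_right
            linarith
          · rw [if_neg hji, add_zero]
            have := hq j
            rw [if_pos hjN] at this
            exact this
        · rw [if_neg hjN]
          have := hq j
          rw [if_neg hjN] at this
          exact this

-- B's stable sort on the tuple key (rounds[i], i) is the sort on the lexicographic key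
lemma pvSorted2_lex (xs : List Int) (k1 : Int → Int) :
    PySem.List.sorted2 xs k1 (fun i => i) =
    PySem.List.sorted xs (fun a => toLex (k1 a, a)) := by
  show List.foldl (fun acc x => PySem.List.insertBy
      (fun a b => decide (k1 a < k1 b) || (!decide (k1 b < k1 a) && decide (a < b))) x acc) [] xs
    = List.foldl (fun acc x => PySem.List.insertBy
      (fun a b => decide (toLex (k1 a, a) < toLex (k1 b, b))) x acc) [] xs
  have hb : (fun (a b : Int) => decide (k1 a < k1 b) || (!decide (k1 b < k1 a) && decide (a < b)))
      = fun (a b : Int) => decide (toLex (k1 a, a) < toLex (k1 b, b)) := by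
    funext a b
    rw [Bool.eq_iff_iff]
    simp only [Bool.or_eq_true, Bool.and_eq_true, Bool.not_eq_true', decide_eq_true_eq,
      decide_eq_false_iff_not, Prod.Lex.lt_iff, ofLex_toLex]
    omega
  rw [hb]

-- ===== VERDICT (by name: the statement is the Claim_ definition above) =====
theorem solution_bf_spec : Claim_equal_solution_bf := by
  intro N X queue _ hpre
  unfold Spec_solution_bf solution_bf solution_bf_alt
  by_cases hN : N ≤ 0
  · rw [PySem.List.pyRange_one_eq_nil hN]
    simp only [pvFuel, pvLoopA, List.map_nil]
    rw [if_neg (by simp; omega)]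
    rfl
  · push_neg at hN
    rcases hpre with h0 | ⟨hX, hlen, hposR⟩
    · omega
    have hposN : ∀ j : Nat, (j : Int) < N → 0 < queue.getD j 0 := by
      intro j hj
      have := hposR (j : Int) (PySem.List.mem_pyRange_one.mpr ⟨by positivity, hj⟩)
      rwa [PySem.List.pyGetD_natCast] at this
    set K : Int → Int := fun i => PySem.List.pyGetD ((PySem.List.pyRange 0 N 1).map
      (fun i => -(PySem.Int.floordiv (-(PySem.List.pyGetD queue i 0)) X))) i 0 with hK
    set ord : List Int := PySem.List.sorted2 (PySem.List.pyRange 0 N 1) K (fun i => i) with hordd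
    have hperm : ord.Perm (PySem.List.pyRange 0 N 1) := by
      rw [hordd]; exact PySem.List.sorted2_perm _ _ _ _
    have hmemord : ∀ j ∈ ord, 0 ≤ j ∧ j < N := by
      intro j hj
      exact PySem.List.mem_pyRange_one.mp (hperm.mem_iff.mp hj)
    have hKkey : ∀ j : Int, 0 ≤ j → j < N → K j = pvKey X queue j := by
      intro j hj0 hjN
      rw [hK]
      exact PySem.List.pyGetD_map_pyRange_of_nonneg _ N j 0 hj0 hjN
    have hord_eq : ord = PySem.List.sorted (PySem.List.pyRange 0 N 1) (fun a => toLex (K a, a)) := by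
      rw [hordd]; exact pvSorted2_lex _ _
    have hple : ord.Pairwise (fun a b => toLex (K a, a) ≤ toLex (K b, b)) := by
      rw [hord_eq]
      exact PySem.List.sorted_pairwise _ _
    have hnd : ord.Nodup := hperm.symm.nodup (PySem.List.nodup_pyRange_one _ _)
    have hpair : ord.Pairwise (fun a b => pvF N X queue a < pvF N X queue b) := by
      refine (hple.and hnd).imp_of_mem ?_
      rintro a b ha hb ⟨hab, hne⟩
      obtain ⟨ha0, haN⟩ := hmemord a ha
      obtain ⟨hb0, hbN⟩ := hmemord b hb
      unfold pvF
      rw [← hKkey a ha0 haN, ← hKkey b hb0 hbN]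
      rw [Prod.Lex.le_iff] at hab
      simp only [ofLex_toLex] at hab
      rcases hab with hlt | ⟨heq, hle⟩
      · have h1 : K a * N ≤ (K b - 1) * N :=
          mul_le_mul_of_nonneg_right (by omega) (by omega)
        have h2 : (K a - 1) * N + N = K a * N := by ring
        linarith
      · rw [heq]
        have : a < b := lt_of_le_of_ne hle hne
        linarith
    have hkeyq : ∀ j ∈ ord, 1 ≤ pvKey X queue j ∧ pvKey X queue j ≤ queue.getD j.toNat 0 := by
      intro j hj
      obtain ⟨hj0, hjN⟩ := hmemord j hj
      have hqj : 0 < queue.getD j.toNat 0 := hposN j.toNat (by omega)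
      have hkd : pvKey X queue j = -(PySem.Int.floordiv (-(queue.getD j.toNat 0)) X) := by
        unfold pvKey
        rw [PySem.List.pyGetD_of_nonneg _ _ hj0]
      obtain ⟨h1, h2, _⟩ := pvKey_bracket (q := queue.getD j.toNat 0) hX hqj
      rw [← hkd] at h1 h2
      refine ⟨h1, ?_⟩
      have h3 : (pvKey X queue j - 1) * 1 ≤ (pvKey X queue j - 1) * X :=
        mul_le_mul_of_nonneg_left (by omega) (by omega)
      linarith
    have hfilter0 : ord.filter (fun j => decide (pvF N X queue j < ((0 : Nat) : Int))) = [] := by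
      rw [List.filter_eq_nil_iff]
      intro j hj
      obtain ⟨hj0, hjN⟩ := hmemord j hj
      obtain ⟨hk1, _⟩ := hkeyq j hj
      simp only [decide_eq_true_eq]
      unfold pvF
      have : 0 ≤ (pvKey X queue j - 1) * N := mul_nonneg (by omega) (by omega)
      push_cast
      omega
    have hinv0 : ∀ j : Nat, queue.getD j 0 =
        if (j : Int) < N then max (queue.getD j 0 - pvV N 0 (j : Int) * X) 0
        else queue.getD j 0 := by
      intro j
      by_cases hjN : (j : Int) < N
      · rw [if_pos hjN]
        unfold pvV
        rw [Nat.cast_zero, Int.zero_emod, Int.zero_ediv, if_neg (by omega)]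
        have hz : queue.getD j 0 - (0 + 0) * X = queue.getD j 0 := by ring
        rw [hz, max_eq_left (le_of_lt (hposN j hjN))]
      · rw [if_neg hjN]
    have hfuel0 : ∀ j ∈ ord, pvF N X queue j < ((0 : Nat) : Int) + (pvFuel N queue : Int) := by
      intro j hj
      obtain ⟨hj0, hjN⟩ := hmemord j hj
      obtain ⟨hk1, hkq⟩ := hkeyq j hj
      have hjlen : j.toNat < queue.length := by omega
      have hS : queue.getD j.toNat 0 ≤ (pvSum queue : Int) := pvSum_getD queue j.toNat hjlen
      have hkS : pvKey X queue j ≤ (pvSum queue : Int) := le_trans hkq hS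
      have h1 : (pvKey X queue j - 1) * N ≤ ((pvSum queue : Int) - 1) * N :=
        mul_le_mul_of_nonneg_right (by omega) (by omega)
      have h2 : ((pvSum queue : Int) - 1) * N + N = (pvSum queue : Int) * N := by ring
      have h3 : (pvFuel N queue : Int) = N * ((pvSum queue : Int) + 1) + 1 := by
        unfold pvFuel
        push_cast [Int.toNat_of_nonneg (le_of_lt hN)]
        ring
      have h4 : N * ((pvSum queue : Int) + 1) = N * (pvSum queue : Int) + N := by ring
      have h5 : (pvSum queue : Int) * N = N * (pvSum queue : Int) := by ring
      unfold pvF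
      push_cast
      linarith
    have hmain := pvLoopA_inv N X queue ord hN hX hlen hposN hperm hpair
      (pvFuel N queue) 0 queue rfl hinv0 hfuel0
    rw [hfilter0] at hmain
    simp only [List.map_nil, Nat.cast_zero, Int.zero_emod] at hmain
    exact hmain
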